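-- pv_equiv track=rewrite | github.com/attavit14203638/frts | Core/metrics.py | metric_names_to_pretty
-- ===== SOURCE A (Python) =====
-- def metric_names_to_pretty(metric_name: str) -> str:
--     """
--     Convert metric name to pretty format for display.
--
--     Args:
--         metric_name: Original metric name
--
--     Returns:
--         Pretty formatted metric name
--     """
--     # Define metric name mapping
--     name_map = {
--         'pixel_accuracy': 'Overall Accuracy',
--         'iou_class_1': 'Tree IoU',
--         'dice_class_1': 'Tree Dice',
--         'precision_class_1': 'Tree Precision',
--         'recall_class_1': 'Tree Recall',
--         'f1_score_class_1': 'Tree F1 Score',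
--         'boundary_iou_class_1': 'Tree Boundary IoU',
--         'loss': 'Loss',
--         'mean_solidity': 'Mean Solidity',
--         'object_count_diff': 'Object Count Diff'
--     }
--
--     # Handle other per-class metrics if class_metrics=True
--     if metric_name.startswith('iou_class_') and metric_name not in name_map:
--         class_num = metric_name.split('_')[-1]
--         return f'Class {class_num} IoU'
--     if metric_name.startswith('dice_class_') and metric_name not in name_map:
--         class_num = metric_name.split('_')[-1]
--         return f'Class {class_num} Dice'
--     if metric_name.startswith('precision_class_') and metric_name not in name_map:
--         class_num = metric_name.split('_')[-1]
--         return f'Class {class_num} Precision'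
--     if metric_name.startswith('recall_class_') and metric_name not in name_map:
--         class_num = metric_name.split('_')[-1]
--         return f'Class {class_num} Recall'
--     # Note: No generic per-class F1 score implemented, only class 1
--     if metric_name.startswith('boundary_iou_class_') and metric_name not in name_map:
--         class_num = metric_name.split('_')[-1]
--         return f'Class {class_num} Boundary IoU'
--     if metric_name.startswith('solidity_class_') and metric_name not in name_map:
--          class_num = metric_name.split('_')[-1]
--          return f'Class {class_num} Solidity'
--
--     # Return pretty name if in mapping, otherwise capitalize words
--     if metric_name in name_map:
--         return name_map[metric_name]
--     else:
--         return ' '.join(word.capitalize() for word in metric_name.split('_'))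
-- ===== SOURCE B (Python) =====
-- _NAME_MAP = {
--     'pixel_accuracy': 'Overall Accuracy',
--     'iou_class_1': 'Tree IoU',
--     'dice_class_1': 'Tree Dice',
--     'precision_class_1': 'Tree Precision',
--     'recall_class_1': 'Tree Recall',
--     'f1_score_class_1': 'Tree F1 Score',
--     'boundary_iou_class_1': 'Tree Boundary IoU',
--     'loss': 'Loss',
--     'mean_solidity': 'Mean Solidity',
--     'object_count_diff': 'Object Count Diff'
-- }
--
-- _PRETTY = {
--     'iou': 'IoU',
--     'dice': 'Dice',
--     'precision': 'Precision',
--     'recall': 'Recall',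
--     'solidity': 'Solidity',
-- }
--
--
-- def metric_names_to_pretty(metric_name: str) -> str:
--     # Known names win over everything else.
--     if metric_name in _NAME_MAP:
--         return _NAME_MAP[metric_name]
--     # Split ONCE and inspect the word structure instead of testing string prefixes:
--     # '<stem>_class_<x...>' means the word list is [stem-words..., 'class', x..., last].
--     words = metric_name.split('_')
--     if len(words) >= 3 and words[1] == 'class':
--         pretty = _PRETTY.get(words[0])
--         if pretty is not None:
--             return f'Class {words[-1]} {pretty}'
--     if len(words) >= 4 and words[:3] == ['boundary', 'iou', 'class']:
--         return f'Class {words[-1]} Boundary IoU'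
--     return ' '.join(w.capitalize() for w in words)
-- ===== Notes on version B (the rewrite author's own statement) =====
-- stated objective: alternative
-- what changed: B looks the name up in the map first, then splits the name into words ONCE and inspects the word structure (words[1]=='class', a dict keyed by the first word, words[:3] for boundary) instead of A's six startswith string-prefix tests that each re-split the string; the capitalize fallback reuses the word list.
import Mathlib
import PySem

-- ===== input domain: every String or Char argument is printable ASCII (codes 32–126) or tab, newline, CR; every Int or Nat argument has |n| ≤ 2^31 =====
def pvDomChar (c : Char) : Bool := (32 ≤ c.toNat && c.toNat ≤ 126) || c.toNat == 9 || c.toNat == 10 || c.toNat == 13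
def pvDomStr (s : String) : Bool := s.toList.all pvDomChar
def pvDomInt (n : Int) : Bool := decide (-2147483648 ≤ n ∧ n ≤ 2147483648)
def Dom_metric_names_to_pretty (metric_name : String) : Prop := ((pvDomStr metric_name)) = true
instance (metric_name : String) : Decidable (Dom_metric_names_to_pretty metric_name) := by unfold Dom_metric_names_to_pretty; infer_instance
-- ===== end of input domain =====

-- B splits the name into its '_'-words once and dispatches on the word structure
-- (words[1]=='class', a dict keyed by the first word) instead of A's six startswith
-- prefix tests that each re-split the string; same result, different decomposition.

-- ===== PORT A =====
-- the literal name_map (same dict literal in both Pythons)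
def pvNameMap : PySem.Dict String String :=
  PySem.Dict.ofList
    [("pixel_accuracy", "Overall Accuracy"),
     ("iou_class_1", "Tree IoU"),
     ("dice_class_1", "Tree Dice"),
     ("precision_class_1", "Tree Precision"),
     ("recall_class_1", "Tree Recall"),
     ("f1_score_class_1", "Tree F1 Score"),
     ("boundary_iou_class_1", "Tree Boundary IoU"),
     ("loss", "Loss"),
     ("mean_solidity", "Mean Solidity"),
     ("object_count_diff", "Object Count Diff")]

-- metric_name.split('_')[-1]; default never used: splitOn always returns a nonempty list
def pvLastPart (metric_name : String) : List Char :=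
  PySem.List.pyGetD (PySem.Chars.splitOn metric_name.toList ['_']) (-1) []

-- word.capitalize(): first char upper-cased, rest lower-cased (exact on the ASCII domain,
-- where Python's title-case of a single char equals its upper-case)
def pvCap (w : List Char) : List Char :=
  match w with
  | [] => []
  | c :: cs => PySem.Chars.upperChar c :: PySem.Chars.lower cs

-- ' '.join(w.capitalize() for w in words)
def pvCapWords (words : List (List Char)) : String :=
  String.ofList (PySem.Chars.join [' '] (words.map pvCap))

-- ' '.join(word.capitalize() for word in metric_name.split('_')) (A re-splits here)
def pvCapJoin (metric_name : String) : String :=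
  pvCapWords (PySem.Chars.splitOn metric_name.toList ['_'])

def metric_names_to_pretty (metric_name : String) : String :=
  if PySem.Str.startswith metric_name "iou_class_" && !(pvNameMap.contains metric_name) then
    String.ofList ("Class ".toList ++ pvLastPart metric_name ++ " IoU".toList)
  else if PySem.Str.startswith metric_name "dice_class_" && !(pvNameMap.contains metric_name) then
    String.ofList ("Class ".toList ++ pvLastPart metric_name ++ " Dice".toList)
  else if PySem.Str.startswith metric_name "precision_class_" && !(pvNameMap.contains metric_name) then
    String.ofList ("Class ".toList ++ pvLastPart metric_name ++ " Precision".toList)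
  else if PySem.Str.startswith metric_name "recall_class_" && !(pvNameMap.contains metric_name) then
    String.ofList ("Class ".toList ++ pvLastPart metric_name ++ " Recall".toList)
  else if PySem.Str.startswith metric_name "boundary_iou_class_" && !(pvNameMap.contains metric_name) then
    String.ofList ("Class ".toList ++ pvLastPart metric_name ++ " Boundary IoU".toList)
  else if PySem.Str.startswith metric_name "solidity_class_" && !(pvNameMap.contains metric_name) then
    String.ofList ("Class ".toList ++ pvLastPart metric_name ++ " Solidity".toList)
  else if pvNameMap.contains metric_name then
    pvNameMap.getD metric_name ""   -- name_map[metric_name]; exact: the key is present here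
  else
    pvCapJoin metric_name

-- ===== PORT B =====
-- the _PRETTY dict of Source B, keyed by the FIRST word of the metric name
def pvPretty : PySem.Dict (List Char) (List Char) :=
  PySem.Dict.ofList
    [("iou".toList, "IoU".toList),
     ("dice".toList, "Dice".toList),
     ("precision".toList, "Precision".toList),
     ("recall".toList, "Recall".toList),
     ("solidity".toList, "Solidity".toList)]

-- Source B after the first (words[1]=='class') branch: the boundary check, then the fallback
def pvBoundaryOrCap (words : List (List Char)) : String :=
  if 4 ≤ words.length ∧ PySem.List.slice words none (some 3) = ["boundary".toList, "iou".toList, "class".toList] then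
    String.ofList ("Class ".toList ++ PySem.List.pyGetD words (-1) [] ++ " ".toList ++ "Boundary IoU".toList)
  else pvCapWords words

def metric_names_to_pretty_alt (metric_name : String) : String :=
  match pvNameMap.get? metric_name with
  | some v => v
  | none =>
    let words := PySem.Chars.splitOn metric_name.toList ['_']
    if 3 ≤ words.length ∧ PySem.List.pyGetD words 1 [] = "class".toList then
      match pvPretty.get? (PySem.List.pyGetD words 0 []) with
      | some pretty =>
        String.ofList ("Class ".toList ++ PySem.List.pyGetD words (-1) [] ++ " ".toList ++ pretty)
      | none => pvBoundaryOrCap words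
    else pvBoundaryOrCap words

-- ===== PRECONDITION & SPEC =====
def Spec_metric_names_to_pretty (metric_name : String) (out : String) : Prop := out = metric_names_to_pretty_alt metric_name
instance (metric_name : String) (out : String) : Decidable (Spec_metric_names_to_pretty metric_name out) := by unfold Spec_metric_names_to_pretty; infer_instance

-- ===== CLAIM (what is proved, stated in full; the proofs are below) =====
def Claim_equal_metric_names_to_pretty : Prop := ∀ (metric_name : String), Dom_metric_names_to_pretty metric_name → Spec_metric_names_to_pretty metric_name (metric_names_to_pretty metric_name)

-- ===== LEMMAS AND PROOFS =====

-- a clean structural model of s.split('_')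
def pvSplit1 : List Char → List (List Char)
  | [] => [[]]
  | c :: t => if c = '_' then [] :: pvSplit1 t else (pvSplit1 t).modifyHead (c :: ·)

theorem pvSplit1_length_pos (s : List Char) : 0 < (pvSplit1 s).length := by
  induction s with
  | nil => simp [pvSplit1]
  | cons c t ih =>
    simp only [pvSplit1]
    split_ifs
    · simp
    · simpa using ih

theorem pvGo_eq (l : List Char) : ∀ (fuel : ℕ) (cur : List Char) (acc : List (List Char)),
    l.length ≤ fuel →
    PySem.Chars.splitOn.go ['_'] fuel l cur acc
      = acc.reverse ++ (pvSplit1 l).modifyHead (fun w => cur.reverse ++ w) := by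
  induction l with
  | nil =>
    intro fuel cur acc _
    cases fuel with
    | zero => simp [PySem.Chars.splitOn.go.eq_1, pvSplit1]
    | succ f => simp [PySem.Chars.splitOn.go.eq_2 ['_'] (f+1) cur acc (by omega), pvSplit1]
  | cons c t ih =>
    intro fuel cur acc hf
    cases fuel with
    | zero => simp at hf
    | succ f =>
      rw [PySem.Chars.splitOn.go.eq_3]
      by_cases hc : c = '_'
      · subst hc
        rw [if_pos (by simp [List.isPrefixOf])]
        have hd : List.drop (['_'] : List Char).length ('_' :: t) = t := by simp
        rw [hd, ih f [] (cur.reverse :: acc) (by simp at hf; omega)]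
        cases h2 : pvSplit1 t <;> simp [pvSplit1, h2]
      · rw [if_neg (by simp [List.isPrefixOf]; intro h; exact absurd h.symm hc)]
        rw [ih f (c :: cur) acc (by simp at hf; omega)]
        simp only [pvSplit1, if_neg hc]
        cases h : pvSplit1 t with
        | nil => simp
        | cons w ws => simp

theorem pvSplitOn_eq (s : List Char) :
    PySem.Chars.splitOn s ['_'] = pvSplit1 s := by
  unfold PySem.Chars.splitOn
  rw [pvGo_eq s (s.length + 1) [] [] (by omega)]
  cases h : pvSplit1 s <;> simp

theorem pvSplit1_word (w : List Char) (hw : '_' ∉ w) (t : List Char) :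
    pvSplit1 (w ++ '_' :: t) = w :: pvSplit1 t := by
  induction w with
  | nil => simp [pvSplit1]
  | cons c w' ih =>
    have hc : c ≠ '_' := fun h => hw (by simp [h])
    have hw' : '_' ∉ w' := fun h => hw (by simp [h])
    simp only [List.cons_append, pvSplit1, if_neg hc, ih hw']
    rfl

theorem pvJoin_cons_head (sep w : List Char) (c : Char) (ws : List (List Char)) :
    PySem.Chars.join sep ((c :: w) :: ws) = c :: PySem.Chars.join sep (w :: ws) := by
  cases ws with
  | nil => simp [PySem.Chars.join_singleton]
  | cons q rest => simp [PySem.Chars.join_cons_cons]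

theorem pvJoin_split1 (s : List Char) :
    PySem.Chars.join ['_'] (pvSplit1 s) = s := by
  induction s with
  | nil => simp [pvSplit1, PySem.Chars.join_singleton]
  | cons c t ih =>
    by_cases hc : c = '_'
    · subst hc
      cases h : pvSplit1 t with
      | nil => exact absurd h (by have := pvSplit1_length_pos t; intro hn; rw [hn] at this; simp at this)
      | cons w ws =>
        rw [h] at ih
        simp only [pvSplit1, h, PySem.Chars.join_cons_cons, reduceIte]
        simp [ih]
    · cases h : pvSplit1 t with
      | nil => exact absurd h (by have := pvSplit1_length_pos t; intro hn; rw [hn] at this; simp at this)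
      | cons w ws =>
        simp only [pvSplit1, if_neg hc, h, List.modifyHead]
        rw [pvJoin_cons_head]
        rw [h] at ih
        rw [ih]

-- from the word structure back to the raw string
theorem pvString_of_words (S w0 w1 : List Char) (rest : List (List Char)) (hr : rest ≠ [])
    (h : pvSplit1 S = w0 :: w1 :: rest) :
    (w0 ++ '_' :: w1 ++ ['_']) <+: S := by
  have hS := pvJoin_split1 S
  rw [h] at hS
  cases rest with
  | nil => exact absurd rfl hr
  | cons r rs =>
    rw [PySem.Chars.join_cons_cons, PySem.Chars.join_cons_cons] at hS
    refine ⟨PySem.Chars.join ['_'] (r :: rs), ?_⟩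
    rw [← hS]
    simp

-- pvPretty.get? evaluated: which keys give some
theorem pvPretty_some (k v : List Char) (h : pvPretty.get? k = some v) :
    (k = "iou".toList ∧ v = "IoU".toList) ∨ (k = "dice".toList ∧ v = "Dice".toList) ∨
    (k = "precision".toList ∧ v = "Precision".toList) ∨ (k = "recall".toList ∧ v = "Recall".toList) ∨
    (k = "solidity".toList ∧ v = "Solidity".toList) := by
  have hi : pvPretty.items =
      [("iou".toList, "IoU".toList), ("dice".toList, "Dice".toList),
       ("precision".toList, "Precision".toList), ("recall".toList, "Recall".toList),
       ("solidity".toList, "Solidity".toList)] := by decide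
  unfold PySem.Dict.get? at h
  obtain ⟨a, hfind, hv⟩ := Option.map_eq_some_iff.mp h
  have hk : a.1 = k := by simpa using List.find?_some hfind
  have hm : a ∈ pvPretty.items := List.mem_of_find?_eq_some hfind
  rw [hi] at hm
  subst hk hv
  simp only [List.mem_cons, List.not_mem_nil, or_false] at hm
  rcases hm with h1 | h1 | h1 | h1 | h1 <;> rw [h1] <;> simp

theorem pvGetD0 (a : List Char) (l : List (List Char)) :
    PySem.List.pyGetD (a :: l) 0 [] = a := by
  simp [PySem.List.pyGetD, PySem.List.pyGet?, PySem.List.pyIdx?]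

theorem pvGetD1 (a b : List Char) (l : List (List Char)) :
    PySem.List.pyGetD (a :: b :: l) 1 [] = b := by
  simp [PySem.List.pyGetD, PySem.List.pyGet?, PySem.List.pyIdx?]

-- three-word variant of pvString_of_words
theorem pvString_of_words3 (S w0 w1 w2 : List Char) (rest : List (List Char)) (hr : rest ≠ [])
    (h : pvSplit1 S = w0 :: w1 :: w2 :: rest) :
    (w0 ++ '_' :: w1 ++ '_' :: w2 ++ ['_']) <+: S := by
  have hS := pvJoin_split1 S
  rw [h] at hS
  cases rest with
  | nil => exact absurd rfl hr
  | cons r rs =>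
    rw [PySem.Chars.join_cons_cons, PySem.Chars.join_cons_cons, PySem.Chars.join_cons_cons] at hS
    refine ⟨PySem.Chars.join ['_'] (r :: rs), ?_⟩
    rw [← hS]
    simp

-- the shared positive single-stem branch of B
theorem pvBranchB (s : String) (w pretty : List Char)
    (hk : pvPretty.get? w = some pretty) (hwu : '_' ∉ w)
    (h : (w ++ '_' :: ("class".toList ++ ['_'])) <+: s.toList) :
    (let words := PySem.Chars.splitOn s.toList ['_'];
     if 3 ≤ words.length ∧ PySem.List.pyGetD words 1 [] = "class".toList then
       match pvPretty.get? (PySem.List.pyGetD words 0 []) with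
       | some pretty =>
         String.ofList ("Class ".toList ++ PySem.List.pyGetD words (-1) [] ++ " ".toList ++ pretty)
       | none => pvBoundaryOrCap words
     else pvBoundaryOrCap words)
    = String.ofList ("Class ".toList ++ pvLastPart s ++ (' ' :: pretty)) := by
  obtain ⟨t, ht⟩ := h
  have ht' : s.toList = w ++ '_' :: ("class".toList ++ '_' :: t) := by
    rw [← ht]; simp
  have hsp : pvSplit1 s.toList = w :: "class".toList :: pvSplit1 t := by
    rw [ht', pvSplit1_word w hwu, pvSplit1_word "class".toList (by decide)]
  simp only [pvSplitOn_eq, hsp]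
  rw [if_pos ⟨by simp only [List.length_cons]; have := pvSplit1_length_pos t; omega, pvGetD1 _ _ _⟩]
  rw [pvGetD0, hk]
  unfold pvLastPart
  rw [pvSplitOn_eq, hsp]
  simp

-- when the name has no boundary_iou_class_ prefix, B's second branch falls through
theorem pvNoBoundary (s : String)
    (h5 : PySem.Chars.startswith s.toList "boundary_iou_class_".toList = false) :
    pvBoundaryOrCap (pvSplit1 s.toList) = pvCapWords (pvSplit1 s.toList) := by
  unfold pvBoundaryOrCap
  rw [if_neg]
  rintro ⟨hl, hs⟩
  rw [PySem.List.slice_to _ (by norm_num)] at hs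
  rw [show Int.toNat 3 = 3 from rfl] at hs
  have hW : pvSplit1 s.toList
      = "boundary".toList :: "iou".toList :: "class".toList :: (pvSplit1 s.toList).drop 3 := by
    conv_lhs => rw [← List.take_append_drop 3 (pvSplit1 s.toList)]
    rw [hs]
    rfl
  have hr : (pvSplit1 s.toList).drop 3 ≠ [] := by
    intro hnil
    have := List.length_drop (l := pvSplit1 s.toList) (i := 3)
    rw [hnil] at this
    simp at this
    omega
  have hpre := pvString_of_words3 s.toList _ _ _ _ hr hW
  rw [← PySem.Chars.startswith_iff] at hpre
  rw [show ("boundary".toList ++ '_' :: "iou".toList ++ '_' :: "class".toList ++ ['_'])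
        = "boundary_iou_class_".toList from by decide] at hpre
  rw [h5] at hpre
  exact absurd hpre (by simp)
-- ===== VERDICT (by name: the statement is the Claim_ definition above) =====
theorem metric_names_to_pretty_spec : Claim_equal_metric_names_to_pretty := by
  intro s _
  unfold Spec_metric_names_to_pretty metric_names_to_pretty
  cases hg : pvNameMap.get? s with
  | some v =>
    have hc : pvNameMap.contains s = true := by
      rw [PySem.Dict.contains_eq_isSome_get?, hg]; rfl
    have hv : pvNameMap.getD s "" = v := by rw [PySem.Dict.getD_eq_get?_getD, hg]; rfl
    have hAlt : metric_names_to_pretty_alt s = v := by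
      simp only [metric_names_to_pretty_alt, hg]
    simp only [hc, Bool.not_true, Bool.and_false, Bool.false_eq_true, if_false, if_true]
    rw [hv, hAlt]
  | none =>
    have hc : pvNameMap.contains s = false := by
      rw [PySem.Dict.contains_eq_isSome_get?, hg]; rfl
    have hAlt : metric_names_to_pretty_alt s =
        (let words := PySem.Chars.splitOn s.toList ['_'];
         if 3 ≤ words.length ∧ PySem.List.pyGetD words 1 [] = "class".toList then
           match pvPretty.get? (PySem.List.pyGetD words 0 []) with
           | some pretty =>
             String.ofList ("Class ".toList ++ PySem.List.pyGetD words (-1) [] ++ " ".toList ++ pretty)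
           | none => pvBoundaryOrCap words
         else pvBoundaryOrCap words) := by
      simp only [metric_names_to_pretty_alt, hg]
    simp only [hc, Bool.not_false, Bool.and_true, Bool.false_eq_true, if_false]
    rw [hAlt]
    generalize hB : (let words := PySem.Chars.splitOn s.toList ['_'];
         if 3 ≤ words.length ∧ PySem.List.pyGetD words 1 [] = "class".toList then
           match pvPretty.get? (PySem.List.pyGetD words 0 []) with
           | some pretty =>
             String.ofList ("Class ".toList ++ PySem.List.pyGetD words (-1) [] ++ " ".toList ++ pretty)
           | none => pvBoundaryOrCap words
         else pvBoundaryOrCap words) = B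
    split_ifs with h1 h2 h3 h4 h5 h6 <;> rw [← hB]
    · exact (pvBranchB s "iou".toList "IoU".toList (by decide) (by decide)
        (by rw [show ("iou".toList ++ '_' :: ("class".toList ++ ['_'])) = "iou_class_".toList from by decide]
            exact (PySem.Chars.startswith_iff _ _).mp h1)).symm
    · exact (pvBranchB s "dice".toList "Dice".toList (by decide) (by decide)
        (by rw [show ("dice".toList ++ '_' :: ("class".toList ++ ['_'])) = "dice_class_".toList from by decide]
            exact (PySem.Chars.startswith_iff _ _).mp h2)).symm
    · exact (pvBranchB s "precision".toList "Precision".toList (by decide) (by decide)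
        (by rw [show ("precision".toList ++ '_' :: ("class".toList ++ ['_'])) = "precision_class_".toList from by decide]
            exact (PySem.Chars.startswith_iff _ _).mp h3)).symm
    · exact (pvBranchB s "recall".toList "Recall".toList (by decide) (by decide)
        (by rw [show ("recall".toList ++ '_' :: ("class".toList ++ ['_'])) = "recall_class_".toList from by decide]
            exact (PySem.Chars.startswith_iff _ _).mp h4)).symm
    · -- boundary_iou_class_
      obtain ⟨t, ht⟩ := (PySem.Chars.startswith_iff _ _).mp h5
      have ht' : s.toList = "boundary".toList ++ '_' :: ("iou".toList ++ '_' :: ("class".toList ++ '_' :: t)) := by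
        rw [← ht]; simp
      have hsp : pvSplit1 s.toList
          = "boundary".toList :: "iou".toList :: "class".toList :: pvSplit1 t := by
        rw [ht', pvSplit1_word _ (by decide), pvSplit1_word _ (by decide), pvSplit1_word _ (by decide)]
      simp only [pvSplitOn_eq, hsp]
      rw [if_neg (by rintro ⟨-, hcl⟩; rw [pvGetD1] at hcl; exact absurd hcl (by decide))]
      unfold pvBoundaryOrCap
      rw [if_pos ⟨by simp only [List.length_cons]; have := pvSplit1_length_pos t; omega,
                  by rw [PySem.List.slice_to _ (by norm_num)]; rfl⟩]
      unfold pvLastPart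
      rw [pvSplitOn_eq, hsp]
      congr 1
      simp
    · exact (pvBranchB s "solidity".toList "Solidity".toList (by decide) (by decide)
        (by rw [show ("solidity".toList ++ '_' :: ("class".toList ++ ['_'])) = "solidity_class_".toList from by decide]
            exact (PySem.Chars.startswith_iff _ _).mp h6)).symm
    · -- no branch of A fires: B falls through to the capitalize join too
      simp only [pvSplitOn_eq]
      have hnb : pvBoundaryOrCap (pvSplit1 s.toList) = pvCapWords (pvSplit1 s.toList) :=
        pvNoBoundary s (by simpa using h5)
      by_cases hcond : 3 ≤ (pvSplit1 s.toList).length ∧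
          PySem.List.pyGetD (pvSplit1 s.toList) 1 [] = "class".toList
      · rw [if_pos hcond]
        obtain ⟨hlen, hcls⟩ := hcond
        cases hk : pvPretty.get? (PySem.List.pyGetD (pvSplit1 s.toList) 0 []) with
        | none =>
          rw [hnb]
          unfold pvCapJoin
          rw [pvSplitOn_eq]
        | some pretty =>
          exfalso
          obtain ⟨w0, l1, hW0⟩ : ∃ w0 l1, pvSplit1 s.toList = w0 :: l1 := by
            cases h : pvSplit1 s.toList with
            | nil => rw [h] at hlen; simp at hlen
            | cons a l => exact ⟨a, l, rfl⟩
          obtain ⟨w1, rest, hW1⟩ : ∃ w1 rest, l1 = w1 :: rest := by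
            cases h : l1 with
            | nil => rw [hW0, h] at hlen; simp at hlen
            | cons a l => exact ⟨a, l, rfl⟩
          have hW : pvSplit1 s.toList = w0 :: w1 :: rest := by rw [hW0, hW1]
          have hrne : rest ≠ [] := by
            intro hnil
            rw [hW, hnil] at hlen; simp at hlen
          rw [hW, pvGetD1] at hcls
          subst hcls
          rw [hW, pvGetD0] at hk
          have hpre := pvString_of_words s.toList _ _ _ hrne hW
          rcases pvPretty_some _ _ hk with ⟨h0, -⟩ | ⟨h0, -⟩ | ⟨h0, -⟩ | ⟨h0, -⟩ | ⟨h0, -⟩ <;>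
            subst h0
          · rw [show ("iou".toList ++ '_' :: "class".toList ++ ['_']) = "iou_class_".toList
                from by decide] at hpre
            rw [← PySem.Chars.startswith_iff] at hpre
            exact absurd hpre (by simpa using h1)
          · rw [show ("dice".toList ++ '_' :: "class".toList ++ ['_']) = "dice_class_".toList
                from by decide] at hpre
            rw [← PySem.Chars.startswith_iff] at hpre
            exact absurd hpre (by simpa using h2)
          · rw [show ("precision".toList ++ '_' :: "class".toList ++ ['_']) = "precision_class_".toList
                from by decide] at hpre
            rw [← PySem.Chars.startswith_iff] at hpre
            exact absurd hpre (by simpa using h3)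
          · rw [show ("recall".toList ++ '_' :: "class".toList ++ ['_']) = "recall_class_".toList
                from by decide] at hpre
            rw [← PySem.Chars.startswith_iff] at hpre
            exact absurd hpre (by simpa using h4)
          · rw [show ("solidity".toList ++ '_' :: "class".toList ++ ['_']) = "solidity_class_".toList
                from by decide] at hpre
            rw [← PySem.Chars.startswith_iff] at hpre
            exact absurd hpre (by simpa using h6)
      · rw [if_neg hcond, hnb]
        unfold pvCapJoin
        rw [pvSplitOn_eq]
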